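-- pv_equiv track=rewrite | github.com/libraz/midi-sketch-bach | scripts/extract_markov_tables.py | pitch_to_abs_degree
-- ===== SOURCE A (Python) =====
-- MAJOR_SCALE = [0, 2, 4, 5, 7, 9, 11]
--
-- MINOR_SCALE = [0, 2, 3, 5, 7, 8, 10]
--
-- def pitch_to_abs_degree(pitch: int, key: int, is_minor: bool) -> int:
--     """Convert MIDI pitch to absolute scale degree.
--
--     Args:
--         pitch: MIDI pitch number (0-127).
--         key: Key root as pitch class (0=C, 1=C#, ..., 11=B).
--         is_minor: True for minor key, False for major.
--
--     Returns:
--         Absolute scale degree (octave * 7 + degree_within_octave).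
--     """
--     scale = MINOR_SCALE if is_minor else MAJOR_SCALE
--     octave = pitch // 12
--     pitch_class = pitch % 12
--     relative_pc = (pitch_class - key) % 12
--
--     best_deg = 0
--     best_dist = 99
--     for idx, scale_pc in enumerate(scale):
--         dist = min(abs(relative_pc - scale_pc), 12 - abs(relative_pc - scale_pc))
--         if dist < best_dist:
--             best_dist = dist
--             best_deg = idx
--
--     return octave * 7 + best_deg
-- ===== SOURCE B (Python) =====
-- MAJOR_NEAREST = [0, 0, 1, 1, 2, 3, 3, 4, 4, 5, 5, 6]
-- MINOR_NEAREST = [0, 0, 1, 2, 2, 3, 3, 4, 5, 5, 6, 0]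
--
-- def pitch_to_abs_degree(pitch: int, key: int, is_minor: bool) -> int:
--     """Closed-form lookup: relative pitch-class -> nearest scale degree."""
--     table = MINOR_NEAREST if is_minor else MAJOR_NEAREST
--     return (pitch // 12) * 7 + table[(pitch % 12 - key) % 12]
-- ===== Notes on version B (the rewrite author's own statement) =====
-- stated objective: simpler
-- what changed: Replaces the running-min nearest-neighbour scan over the 7-note scale with a precomputed 12-entry lookup table from relative pitch-class to nearest degree.
import Mathlib
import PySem

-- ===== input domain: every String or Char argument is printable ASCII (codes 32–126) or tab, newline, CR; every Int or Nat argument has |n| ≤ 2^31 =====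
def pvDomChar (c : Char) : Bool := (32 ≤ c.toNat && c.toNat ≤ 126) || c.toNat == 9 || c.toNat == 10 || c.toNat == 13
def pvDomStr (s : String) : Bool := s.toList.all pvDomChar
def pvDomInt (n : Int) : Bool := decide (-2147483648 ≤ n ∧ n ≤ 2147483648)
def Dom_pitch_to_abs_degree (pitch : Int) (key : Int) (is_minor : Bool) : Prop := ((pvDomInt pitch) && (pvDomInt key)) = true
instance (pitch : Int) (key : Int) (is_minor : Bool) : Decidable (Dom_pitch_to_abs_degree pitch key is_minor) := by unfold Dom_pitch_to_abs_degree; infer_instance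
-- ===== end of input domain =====

-- B replaces A's running-min nearest-neighbour scan over the 7-note scale by a
-- precomputed 12-entry lookup table (relative pitch-class -> nearest degree): simpler.

-- ===== PORT A =====
def MAJOR_SCALE : List Int := [0, 2, 4, 5, 7, 9, 11]
def MINOR_SCALE : List Int := [0, 2, 3, 5, 7, 8, 10]

def pitch_to_abs_degree (pitch : Int) (key : Int) (is_minor : Bool) : Int :=
  let scale := if is_minor then MINOR_SCALE else MAJOR_SCALE
  let octave := PySem.Int.floordiv pitch 12
  let pitch_class := PySem.Int.mod pitch 12
  let relative_pc := PySem.Int.mod (pitch_class - key) 12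
  let st := (PySem.List.enumerate scale).foldl
    (fun (st : Int × Int) (p : Int × Int) =>
      let dist := min (|relative_pc - p.2|) (12 - |relative_pc - p.2|)
      if dist < st.2 then (p.1, dist) else st)
    (0, 99)
  octave * 7 + st.1

-- ===== PORT B =====
def MAJOR_NEAREST : List Int := [0, 0, 1, 1, 2, 3, 3, 4, 4, 5, 5, 6]
def MINOR_NEAREST : List Int := [0, 0, 1, 2, 2, 3, 3, 4, 5, 5, 6, 0]

-- table[(pitch % 12 - key) % 12]: the index is always in 0..11, so Python's
-- indexing never raises; ported as pyGet? with a default never taken.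
def pitch_to_abs_degree_alt (pitch : Int) (key : Int) (is_minor : Bool) : Int :=
  let table := if is_minor then MINOR_NEAREST else MAJOR_NEAREST
  PySem.Int.floordiv pitch 12 * 7 +
    (PySem.List.pyGet? table (PySem.Int.mod (PySem.Int.mod pitch 12 - key) 12)).getD 0

-- ===== PRECONDITION & SPEC =====
def Spec_pitch_to_abs_degree (pitch : Int) (key : Int) (is_minor : Bool) (out : Int) : Prop := out = pitch_to_abs_degree_alt pitch key is_minor
instance (pitch : Int) (key : Int) (is_minor : Bool) (out : Int) : Decidable (Spec_pitch_to_abs_degree pitch key is_minor out) := by unfold Spec_pitch_to_abs_degree; infer_instance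

-- ===== CLAIM (what is proved, stated in full; the proofs are below) =====
def Claim_equal_pitch_to_abs_degree : Prop := ∀ (pitch : Int) (key : Int) (is_minor : Bool), Dom_pitch_to_abs_degree pitch key is_minor → Spec_pitch_to_abs_degree pitch key is_minor (pitch_to_abs_degree pitch key is_minor)

-- ===== LEMMAS AND PROOFS =====

-- A's scan and B's lookup agree for every relative pitch-class r ∈ [0, 12).
theorem scan_eq_table (r : Int) (hr0 : 0 ≤ r) (hr : r < 12) (is_minor : Bool) :
    ((PySem.List.enumerate (if is_minor then MINOR_SCALE else MAJOR_SCALE)).foldl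
      (fun (st : Int × Int) (p : Int × Int) =>
        let dist := min (|r - p.2|) (12 - |r - p.2|)
        if dist < st.2 then (p.1, dist) else st)
      (0, 99)).1
    = (PySem.List.pyGet? (if is_minor then MINOR_NEAREST else MAJOR_NEAREST) r).getD 0 := by
  interval_cases r <;> cases is_minor <;> decide

theorem pitch_to_abs_degree_eq (pitch key : Int) (is_minor : Bool) :
    pitch_to_abs_degree pitch key is_minor = pitch_to_abs_degree_alt pitch key is_minor := by
  unfold pitch_to_abs_degree pitch_to_abs_degree_alt
  have h := scan_eq_table (PySem.Int.mod (PySem.Int.mod pitch 12 - key) 12)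
    (PySem.Int.mod_nonneg (a := PySem.Int.mod pitch 12 - key) (b := 12) (by norm_num))
    (PySem.Int.mod_lt (a := PySem.Int.mod pitch 12 - key) (b := 12) (by norm_num)) is_minor
  simp only [] at h ⊢
  rw [h]

-- ===== VERDICT (by name: the statement is the Claim_ definition above) =====
theorem pitch_to_abs_degree_spec : Claim_equal_pitch_to_abs_degree := by
  intro pitch key is_minor _
  exact pitch_to_abs_degree_eq pitch key is_minor
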